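-- pv_equiv track=rewrite | github.com/lvalentine6/algorithm_python | goorm/352227.py | dfs
-- ===== SOURCE A (Python) =====
-- def dfs(n, node, position, visited, num):
--     if position == 1:
--         return num
--
--     for x in node[position]:
--         if not visited[x]:
--             visited[x] = True
--             res = dfs(n, node, x, visited, num)
--             if res != 0:
--                 return res
--
--     return 0
-- ===== SOURCE B (Python) =====
-- # Iterative re-implementation: explicit stack of neighbor iterators instead of recursion.
-- # Equivalence is about the RETURN value; like A, it mutates `visited` (when num == 0 it may
-- # mark fewer nodes than A, since it stops as soon as node 1 is reached).
-- def dfs(n, node, position, visited, num):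
--     if position == 1:
--         return num
--     stack = [iter(node[position])]
--     while stack:
--         x = next(stack[-1], None)
--         if x is None:
--             stack.pop()
--             continue
--         if visited[x]:
--             continue
--         visited[x] = True
--         if x == 1:
--             return num
--         stack.append(iter(node[x]))
--     return 0
-- ===== Notes on version B (the rewrite author's own statement) =====
-- stated objective: alternative
-- what changed: Replaces A's recursive DFS with an explicit stack of neighbor iterators that preserves the same visit order and early exit, avoiding Python's recursion depth limit.
-- outside the precondition, e.g. on dfs(5, {2: [3], 3: [], 4: [9]}, 2, {3: False}, 7): A returns 0, B returns 0
import Mathlib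
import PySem

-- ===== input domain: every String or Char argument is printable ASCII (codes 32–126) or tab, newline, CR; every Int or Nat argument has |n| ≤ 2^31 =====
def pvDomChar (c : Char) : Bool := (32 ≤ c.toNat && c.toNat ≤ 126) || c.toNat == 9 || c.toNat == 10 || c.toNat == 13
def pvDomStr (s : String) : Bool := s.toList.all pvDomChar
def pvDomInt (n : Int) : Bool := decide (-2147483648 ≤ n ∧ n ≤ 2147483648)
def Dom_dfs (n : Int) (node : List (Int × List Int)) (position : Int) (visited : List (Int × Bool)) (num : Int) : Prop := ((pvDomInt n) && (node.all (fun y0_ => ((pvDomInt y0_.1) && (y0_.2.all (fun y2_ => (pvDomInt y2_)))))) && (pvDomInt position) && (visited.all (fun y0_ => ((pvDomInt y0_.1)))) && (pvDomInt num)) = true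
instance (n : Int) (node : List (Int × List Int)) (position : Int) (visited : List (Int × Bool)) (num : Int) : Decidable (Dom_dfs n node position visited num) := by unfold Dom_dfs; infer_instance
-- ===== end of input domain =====

-- B replaces A's recursive DFS by an explicit stack of neighbor iterators with the same visit
-- order and early exit (return value only: both mutate `visited` in Python; when num == 0, B may
-- mark fewer nodes because it stops as soon as node 1 is reached).

-- ===== PORT A =====
-- dict primitives shared by both ports: first-match lookup / in-place overwrite
-- (under Pre_dfs every looked-up key is present, so the getD-style defaults are never used).
def vget (v : List (Int × Bool)) (x : Int) : Bool :=
  match v with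
  | [] => false
  | (k, b) :: t => if k = x then b else vget t x

def vset (v : List (Int × Bool)) (x : Int) : List (Int × Bool) :=
  match v with
  | [] => [(x, true)]
  | (k, b) :: t => if k = x then (k, true) :: t else (k, b) :: vset t x

def adjOf (node : List (Int × List Int)) (p : Int) : List Int :=
  match node with
  | [] => []
  | (k, l) :: t => if k = p then l else adjOf t p

-- fuel bound for A's recursion: depth never exceeds the number of adjacency entries + 1
def allAdj (node : List (Int × List Int)) : List Int := (node.map (·.2)).flatten

-- A's recursion, fueled (fuel is only a totality guard; it is proved sufficient below):
-- recA = the function `dfs`, goA = its `for x in node[position]` loop, threading `visited`.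
mutual
def recA (node : List (Int × List Int)) (num : Int) : Nat → Int → List (Int × Bool) → Option (Int × List (Int × Bool))
  | 0, _, _ => none
  | f + 1, p, v => if p = 1 then some (num, v) else goA node num f (adjOf node p) v
  termination_by f _ _ => (f, 0)
def goA (node : List (Int × List Int)) (num : Int) : Nat → List Int → List (Int × Bool) → Option (Int × List (Int × Bool))
  | _, [], v => some (0, v)
  | f, x :: xs, v =>
    if vget v x then goA node num f xs v
    else
      match recA node num f x (vset v x) with
      | none => none
      | some (r, v2) => if r ≠ 0 then some (r, v2) else goA node num f xs v2
  termination_by f l _ => (f, l.length + 1)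
end

def dfs (n : Int) (node : List (Int × List Int)) (position : Int) (visited : List (Int × Bool)) (num : Int) : Int :=
  match recA node num ((allAdj node).length + 1) position visited with
  | some (r, _) => r
  | none => 0  -- unreachable: the fuel is proved sufficient (recA_suff below)

-- ===== PORT B =====
-- B's while-loop over the explicit stack of iterators, fueled (fuel proved sufficient below).
def stepB (node : List (Int × List Int)) (num : Int) : Nat → List (List Int) → List (Int × Bool) → Option Int
  | 0, _, _ => none
  | _ + 1, [], _ => some 0
  | f + 1, [] :: rest, v => stepB node num f rest v          -- iterator exhausted: pop
  | f + 1, (x :: xs) :: rest, v =>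
    if vget v x then stepB node num f (xs :: rest) v          -- visited: continue
    else
      let v' := vset v x                                      -- mark
      if x = 1 then some num                                  -- reached 1
      else stepB node num f (adjOf node x :: xs :: rest) v'   -- push iter(node[x])

def fuelB (node : List (Int × List Int)) : Nat :=
  let T := (allAdj node).length
  (T + 1) + T * (T + 2) + 1

def dfs_alt (n : Int) (node : List (Int × List Int)) (position : Int) (visited : List (Int × Bool)) (num : Int) : Int :=
  if position = 1 then num
  else
    match stepB node num (fuelB node) [adjOf node position] visited with
    | some r => r
    | none => 0  -- unreachable: fuel proved sufficient (stepB_suff below)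

-- ===== PRECONDITION & SPEC =====
-- Closed-form sufficient conditions for A's dict lookups to all succeed: either the whole
-- adjacency table is well-keyed, or already the first level of neighbours is visited/node 1 so
-- the traversal stops there; this excludes some inputs A returns on (where an ill-keyed entry
-- happens to be unreachable).
def Pre_dfs (n : Int) (node : List (Int × List Int)) (position : Int) (visited : List (Int × Bool)) (num : Int) : Prop :=
  position = 1 ∨
  (position ∈ node.map (·.1) ∧
    ((∀ x ∈ adjOf node position, x ∈ visited.map (·.1) ∧ (vget visited x = true ∨ x = 1)) ∨
     (∀ p ∈ node, ∀ x ∈ p.2, x ∈ visited.map (·.1) ∧ (x = 1 ∨ x ∈ node.map (·.1)))))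
instance (n : Int) (node : List (Int × List Int)) (position : Int) (visited : List (Int × Bool)) (num : Int) : Decidable (Pre_dfs n node position visited num) := by unfold Pre_dfs; infer_instance

def pvWitness_dfs : Int × (List (Int × List Int)) × Int × (List (Int × Bool)) × Int :=
  (3, [(2, [3]), (3, [1])], 2, [(1, false), (2, true), (3, false)], 7)

def Spec_dfs (n : Int) (node : List (Int × List Int)) (position : Int) (visited : List (Int × Bool)) (num : Int) (out : Int) : Prop := out = dfs_alt n node position visited num
instance (n : Int) (node : List (Int × List Int)) (position : Int) (visited : List (Int × Bool)) (num : Int) (out : Int) : Decidable (Spec_dfs n node position visited num out) := by unfold Spec_dfs; infer_instance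

-- ===== CLAIM (what is proved, stated in full; the proofs are below) =====
def Claim_equal_dfs : Prop := ∀ (n : Int) (node : List (Int × List Int)) (position : Int) (visited : List (Int × Bool)) (num : Int), Dom_dfs n node position visited num → Pre_dfs n node position visited num → Spec_dfs n node position visited num (dfs n node position visited num)

-- ===== LEMMAS AND PROOFS =====

-- unfolding equations for the ports' recursions (cited by the proofs below)
lemma recA_zero (node : List (Int × List Int)) (num : Int) (p : Int) (v : List (Int × Bool)) :
    recA node num 0 p v = none := by rw [recA]

lemma recA_succ (node : List (Int × List Int)) (num : Int) (f : Nat) (p : Int) (v : List (Int × Bool)) :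
    recA node num (f + 1) p v = if p = 1 then some (num, v) else goA node num f (adjOf node p) v := by
  rw [recA]

lemma goA_nil (node : List (Int × List Int)) (num : Int) (f : Nat) (v : List (Int × Bool)) :
    goA node num f [] v = some (0, v) := by rw [goA]

lemma goA_cons (node : List (Int × List Int)) (num : Int) (f : Nat) (x : Int) (xs : List Int) (v : List (Int × Bool)) :
    goA node num f (x :: xs) v =
      if vget v x then goA node num f xs v
      else
        match recA node num f x (vset v x) with
        | none => none
        | some (r, v2) => if r ≠ 0 then some (r, v2) else goA node num f xs v2 := by
  rw [goA]

lemma stepB_zero (node : List (Int × List Int)) (num : Int) (stack : List (List Int)) (v : List (Int × Bool)) :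
    stepB node num 0 stack v = none := rfl

lemma stepB_nil (node : List (Int × List Int)) (num : Int) (f : Nat) (v : List (Int × Bool)) :
    stepB node num (f + 1) [] v = some 0 := rfl

lemma stepB_pop (node : List (Int × List Int)) (num : Int) (f : Nat) (rest : List (List Int)) (v : List (Int × Bool)) :
    stepB node num (f + 1) ([] :: rest) v = stepB node num f rest v := rfl

lemma stepB_cons (node : List (Int × List Int)) (num : Int) (f : Nat) (x : Int) (xs : List Int) (rest : List (List Int)) (v : List (Int × Bool)) :
    stepB node num (f + 1) ((x :: xs) :: rest) v =
      if vget v x then stepB node num f (xs :: rest) v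
      else if x = 1 then some num
      else stepB node num f (adjOf node x :: xs :: rest) (vset v x) := rfl

-- ---- visited-map basics ----
lemma vget_cons (k : Int) (b : Bool) (t : List (Int × Bool)) (y : Int) :
    vget ((k, b) :: t) y = if k = y then b else vget t y := rfl

lemma vset_cons (k : Int) (b : Bool) (t : List (Int × Bool)) (x : Int) :
    vset ((k, b) :: t) x = if k = x then (k, true) :: t else (k, b) :: vset t x := rfl

lemma vget_vset_self (v : List (Int × Bool)) (x : Int) : vget (vset v x) x = true := by
  induction v with
  | nil => rw [show vset [] x = [(x, true)] from rfl, vget_cons, if_pos rfl]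
  | cons hd t ih =>
    obtain ⟨k, b⟩ := hd
    by_cases hk : k = x
    · rw [vset_cons, if_pos hk, vget_cons, if_pos hk]
    · rw [vset_cons, if_neg hk, vget_cons, if_neg hk]; exact ih

lemma vget_vset_ne (v : List (Int × Bool)) (x y : Int) (h : y ≠ x) :
    vget (vset v x) y = vget v y := by
  induction v with
  | nil =>
    rw [show vset [] x = [(x, true)] from rfl, vget_cons,
      if_neg (fun hxy : x = y => h hxy.symm)]
  | cons hd t ih =>
    obtain ⟨k, b⟩ := hd
    by_cases hk : k = x
    · rw [vset_cons, if_pos hk, vget_cons, vget_cons,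
        if_neg (fun hky : k = y => h (hky.symm.trans hk)),
        if_neg (fun hky : k = y => h (hky.symm.trans hk))]
    · rw [vset_cons, if_neg hk, vget_cons, vget_cons]
      by_cases hky : k = y
      · rw [if_pos hky, if_pos hky]
      · rw [if_neg hky, if_neg hky]; exact ih

lemma vget_vset (v : List (Int × Bool)) (x y : Int) :
    vget (vset v x) y = if y = x then true else vget v y := by
  by_cases h : y = x
  · subst h; simp [vget_vset_self]
  · simp [h, vget_vset_ne v x y h]

lemma vget_vset_mono (v : List (Int × Bool)) (x y : Int) (h : vget v y = true) :
    vget (vset v x) y = true := by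
  rw [vget_vset]; split <;> simp [h]

-- the unvisited count over a fixed universe
def mcount (U : List Int) (v : List (Int × Bool)) : Nat :=
  (U.filter (fun y => !vget v y)).length

lemma filter_length_mono {α : Type} (l : List α) (p q : α → Bool)
    (h : ∀ a ∈ l, p a = true → q a = true) :
    (l.filter p).length ≤ (l.filter q).length := by
  induction l with
  | nil => simp
  | cons a t ih =>
    have ht : ∀ b ∈ t, p b = true → q b = true := fun b hb => h b (List.mem_cons_of_mem _ hb)
    by_cases hp : p a = true
    · rw [List.filter_cons, List.filter_cons, if_pos hp, if_pos (h a (List.mem_cons_self) hp)]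
      exact Nat.succ_le_succ (ih ht)
    · rw [List.filter_cons, if_neg hp, List.filter_cons]
      split
      · exact Nat.le_succ_of_le (ih ht)
      · exact ih ht

lemma mcount_mono (U : List Int) (v v' : List (Int × Bool))
    (h : ∀ y, vget v y = true → vget v' y = true) :
    mcount U v' ≤ mcount U v := by
  apply filter_length_mono
  intro a _ ha
  simp only [Bool.not_eq_true'] at ha ⊢
  by_contra hc
  simp only [Bool.not_eq_false] at hc
  rw [h a hc] at ha; exact absurd ha (by simp)

lemma mcount_vset_lt (U : List Int) (v : List (Int × Bool)) (x : Int)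
    (hx : x ∈ U) (hv : vget v x = false) :
    mcount U (vset v x) < mcount U v := by
  induction U with
  | nil => cases hx
  | cons a t ih =>
    have hmt : mcount t (vset v x) ≤ mcount t v :=
      mcount_mono t v (vset v x) (fun y hy => vget_vset_mono v x y hy)
    simp only [mcount] at hmt ⊢
    by_cases hax : a = x
    · subst hax
      rw [List.filter_cons, List.filter_cons, vget_vset_self, hv]
      simp only [Bool.not_true, Bool.not_false]
      rw [if_neg (by decide), if_pos (by trivial)]
      simp only [List.length_cons]
      omega
    · rw [List.filter_cons, List.filter_cons, vget_vset_ne v x a hax]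
      rcases List.mem_cons.mp hx with hh | hh
      · exact absurd hh.symm hax
      · have := ih hh
        simp only [mcount] at this
        split
        · simp only [List.length_cons]; omega
        · omega

lemma mcount_le (U : List Int) (v : List (Int × Bool)) : mcount U v ≤ U.length :=
  List.length_filter_le _ _

-- ---- adjacency basics ----
lemma adjOf_subset (node : List (Int × List Int)) (p : Int) :
    (∀ y ∈ adjOf node p, y ∈ allAdj node) ∧ (adjOf node p).length ≤ (allAdj node).length := by
  induction node with
  | nil => simp [adjOf, allAdj]
  | cons hd t ih =>
    obtain ⟨k, l⟩ := hd
    by_cases hk : k = p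
    · refine ⟨?_, ?_⟩
      · intro y hy
        simp only [allAdj, List.map_cons, List.flatten_cons, List.mem_append]
        exact Or.inl (by simpa [adjOf, hk] using hy)
      · simp only [adjOf, if_pos hk, allAdj, List.map_cons, List.flatten_cons, List.length_append]
        omega
    · refine ⟨?_, ?_⟩
      · intro y hy
        simp only [allAdj, List.map_cons, List.flatten_cons, List.mem_append]
        exact Or.inr (by simpa [allAdj] using ih.1 y (by simpa [adjOf, hk] using hy))
      · simp only [adjOf, if_neg hk, allAdj, List.map_cons, List.flatten_cons, List.length_append]
        have := ih.2
        simp only [allAdj] at this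
        omega

-- ---- fuel monotonicity (B side) ----
lemma stepB_mono (node : List (Int × List Int)) (num : Int) : ∀ f stack v r,
    stepB node num f stack v = some r → stepB node num (f + 1) stack v = some r := by
  intro f
  induction f with
  | zero => intro stack v r h; rw [stepB_zero] at h; cases h
  | succ f ih =>
    intro stack v r h
    match stack with
    | [] => exact h
    | [] :: rest =>
      rw [stepB_pop] at h ⊢
      exact ih _ _ _ h
    | (x :: xs) :: rest =>
      rw [stepB_cons] at h ⊢
      by_cases hv : vget v x = true
      · rw [if_pos hv] at h ⊢; exact ih _ _ _ h
      · rw [if_neg hv] at h ⊢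
        by_cases hx : x = 1
        · rw [if_pos hx] at h ⊢; exact h
        · rw [if_neg hx] at h ⊢; exact ih _ _ _ h

lemma stepB_mono_le (node : List (Int × List Int)) (num : Int) (f f' : Nat) (hle : f ≤ f')
    (stack : List (List Int)) (v : List (Int × Bool)) (r : Int)
    (h : stepB node num f stack v = some r) : stepB node num f' stack v = some r := by
  induction f' with
  | zero =>
    have hf : f = 0 := by omega
    subst hf; exact h
  | succ g ih =>
    rcases Nat.lt_or_ge f (g + 1) with hlt | hge
    · exact stepB_mono node num g _ _ _ (ih (by omega))
    · have hf : f = g + 1 := by omega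
      subst hf; exact h

-- ---- marks only grow ----
lemma marks_AB (node : List (Int × List Int)) (num : Int) : ∀ f : Nat,
    (∀ p v r v', recA node num f p v = some (r, v') → ∀ y, vget v y = true → vget v' y = true) ∧
    (∀ l v r v', goA node num f l v = some (r, v') → ∀ y, vget v y = true → vget v' y = true) := by
  intro f
  induction f with
  | zero =>
    refine ⟨?_, ?_⟩
    · intro p v r v' h; rw [recA_zero] at h; cases h
    · intro l v r v' h
      induction l generalizing v with
      | nil =>
        rw [goA_nil] at h
        injection h with h'
        injection h' with h1 h2
        intro y hy; rw [← h2]; exact hy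
      | cons x xs ihl =>
        by_cases hv : vget v x = true
        · rw [goA_cons, if_pos hv] at h; exact ihl v h
        · rw [goA_cons, if_neg hv] at h
          simp only [recA_zero] at h
          simp at h
  | succ f ih =>
    have hR : ∀ p v r v', recA node num (f + 1) p v = some (r, v') →
        ∀ y, vget v y = true → vget v' y = true := by
      intro p v r v' h y hy
      rw [recA_succ] at h
      by_cases hp : p = 1
      · rw [if_pos hp] at h
        injection h with h'
        injection h' with h1 h2
        rw [← h2]; exact hy
      · rw [if_neg hp] at h; exact ih.2 _ _ _ _ h y hy
    refine ⟨hR, ?_⟩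
    intro l v r v' h
    induction l generalizing v with
    | nil =>
      rw [goA_nil] at h
      injection h with h'
      injection h' with h1 h2
      intro y hy; rw [← h2]; exact hy
    | cons x xs ihl =>
      by_cases hv : vget v x = true
      · rw [goA_cons, if_pos hv] at h; exact ihl v h
      · rcases hrec : recA node num (f + 1) x (vset v x) with _ | ⟨r0, v2⟩
        · rw [goA_cons, if_neg hv] at h
          simp only [hrec] at h
          simp at h
        · rw [goA_cons, if_neg hv] at h
          simp only [hrec] at h
          have hstep : ∀ y, vget v y = true → vget v2 y = true := fun y hy =>
            hR _ _ _ _ hrec y (vget_vset_mono v x y hy)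
          by_cases h0 : r0 = 0
          · rw [if_neg (fun hc => hc h0)] at h
            intro y hy; exact ihl v2 h y (hstep y hy)
          · rw [if_pos h0] at h
            injection h with h'
            injection h' with h1 h2
            intro y hy; rw [← h2]; exact hstep y hy

-- ---- A-side fuel sufficiency ----
lemma suff_AB (node : List (Int × List Int)) (num : Int) : ∀ f : Nat,
    (∀ p v, mcount (allAdj node) v + 1 ≤ f → ∃ r, recA node num f p v = some r) ∧
    (∀ l v, mcount (allAdj node) v ≤ f → (∀ y ∈ l, y ∈ allAdj node) →
      ∃ r, goA node num f l v = some r) := by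
  intro f
  induction f with
  | zero =>
    refine ⟨?_, ?_⟩
    · intro p v h; omega
    · intro l v hm hl
      induction l generalizing v with
      | nil => exact ⟨(0, v), goA_nil ..⟩
      | cons x xs ihl =>
        by_cases hv : vget v x = true
        · obtain ⟨r, hr⟩ := ihl v hm (fun y hy => hl y (List.mem_cons_of_mem _ hy))
          exact ⟨r, by rw [goA_cons, if_pos hv]; exact hr⟩
        · exfalso
          have := mcount_vset_lt (allAdj node) v x (hl x List.mem_cons_self)
            (by simpa using hv)
          omega
  | succ f ih =>
    have hR : ∀ p v, mcount (allAdj node) v + 1 ≤ f + 1 → ∃ r, recA node num (f + 1) p v = some r := by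
      intro p v h
      by_cases hp : p = 1
      · exact ⟨(num, v), by rw [recA_succ, if_pos hp]⟩
      · obtain ⟨r, hr⟩ := ih.2 (adjOf node p) v (by omega) (adjOf_subset node p).1
        exact ⟨r, by rw [recA_succ, if_neg hp]; exact hr⟩
    refine ⟨hR, ?_⟩
    intro l v hm hl
    induction l generalizing v with
    | nil => exact ⟨(0, v), goA_nil ..⟩
    | cons x xs ihl =>
      by_cases hv : vget v x = true
      · obtain ⟨r, hr⟩ := ihl v hm (fun y hy => hl y (List.mem_cons_of_mem _ hy))
        exact ⟨r, by rw [goA_cons, if_pos hv]; exact hr⟩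
      · have hxU : x ∈ allAdj node := hl x List.mem_cons_self
        have hlt := mcount_vset_lt (allAdj node) v x hxU (by simpa using hv)
        obtain ⟨⟨r0, v2⟩, hrec⟩ := hR x (vset v x) (by omega)
        have hm2 : mcount (allAdj node) v2 ≤ mcount (allAdj node) (vset v x) :=
          mcount_mono _ _ _ (fun y hy => (marks_AB node num (f + 1)).1 _ _ _ _ hrec y hy)
        by_cases h0 : r0 = 0
        · obtain ⟨r, hr⟩ := ihl v2 (by omega) (fun y hy => hl y (List.mem_cons_of_mem _ hy))
          refine ⟨r, ?_⟩
          rw [goA_cons, if_neg hv]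
          simp only [hrec]
          rw [if_neg (fun hc => hc h0)]
          exact hr
        · refine ⟨(r0, v2), ?_⟩
          rw [goA_cons, if_neg hv]
          simp only [hrec]
          rw [if_pos h0]

-- ---- B-side fuel sufficiency ----
def phi (node : List (Int × List Int)) (stack : List (List Int)) (v : List (Int × Bool)) : Nat :=
  (stack.map (fun l => l.length + 1)).sum + mcount (allAdj node) v * ((allAdj node).length + 2)

lemma stepB_suff (node : List (Int × List Int)) (num : Int) : ∀ g stack v,
    (∀ l ∈ stack, ∀ y ∈ l, y ∈ allAdj node) → phi node stack v < g →
    ∃ r, stepB node num g stack v = some r := by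
  intro g
  induction g with
  | zero => intro stack v _ h; omega
  | succ g ih =>
    intro stack v hinv hphi
    rcases stack with _ | ⟨l1, rest⟩
    · exact ⟨0, stepB_nil ..⟩
    rcases l1 with _ | ⟨x, xs⟩
    ·
      obtain ⟨r, hr⟩ := ih rest v (fun l hl => hinv l (List.mem_cons_of_mem _ hl))
        (by simp only [phi, List.map_cons, List.sum_cons] at hphi ⊢; omega)
      exact ⟨r, by rw [stepB_pop]; exact hr⟩
    · by_cases hv : vget v x = true
      · obtain ⟨r, hr⟩ := ih (xs :: rest) v
          (by
            intro l hl
            rcases List.mem_cons.mp hl with h | h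
            · exact fun y hy => hinv (x :: xs) List.mem_cons_self y (List.mem_cons_of_mem _ (h ▸ hy))
            · exact hinv l (List.mem_cons_of_mem _ h))
          (by simp only [phi, List.map_cons, List.sum_cons, List.length_cons] at hphi ⊢; omega)
        exact ⟨r, by rw [stepB_cons, if_pos hv]; exact hr⟩
      · by_cases hx : x = 1
        · exact ⟨num, by rw [stepB_cons, if_neg hv, if_pos hx]⟩
        · have hxU : x ∈ allAdj node := hinv (x :: xs) List.mem_cons_self x List.mem_cons_self
          have hlt := mcount_vset_lt (allAdj node) v x hxU (by simpa using hv)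
          obtain ⟨r, hr⟩ := ih (adjOf node x :: xs :: rest) (vset v x)
            (by
              intro l hl
              rcases List.mem_cons.mp hl with h | h
              · subst h; exact (adjOf_subset node x).1
              · rcases List.mem_cons.mp h with h2 | h2
                · exact fun y hy => hinv (x :: xs) List.mem_cons_self y (List.mem_cons_of_mem _ (h2 ▸ hy))
                · exact hinv l (List.mem_cons_of_mem _ h2))
            (by
              have hlen := (adjOf_subset node x).2
              simp only [phi, List.map_cons, List.sum_cons, List.length_cons] at hphi ⊢
              nlinarith [hphi, hlen, hlt])
          exact ⟨r, by rw [stepB_cons, if_neg hv, if_neg hx]; exact hr⟩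

-- ---- results are num or 0 (used for the num = 0 case) ----
lemma zero_AB (node : List (Int × List Int)) (num : Int) : ∀ f : Nat,
    (∀ p v r v', recA node num f p v = some (r, v') → r = num ∨ r = 0) ∧
    (∀ l v r v', goA node num f l v = some (r, v') → r = num ∨ r = 0) := by
  intro f
  induction f with
  | zero =>
    refine ⟨?_, ?_⟩
    · intro p v r v' h; rw [recA_zero] at h; cases h
    · intro l v r v' h
      induction l generalizing v with
      | nil =>
        rw [goA_nil] at h
        injection h with h'
        injection h' with h1 h2
        exact Or.inr h1.symm
      | cons x xs ihl =>
        by_cases hv : vget v x = true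
        · rw [goA_cons, if_pos hv] at h; exact ihl v h
        · rw [goA_cons, if_neg hv] at h
          simp only [recA_zero] at h
          simp at h
  | succ f ih =>
    have hR : ∀ p v r v', recA node num (f + 1) p v = some (r, v') → r = num ∨ r = 0 := by
      intro p v r v' h
      rw [recA_succ] at h
      by_cases hp : p = 1
      · rw [if_pos hp] at h
        injection h with h'
        injection h' with h1 h2
        exact Or.inl h1.symm
      · rw [if_neg hp] at h; exact ih.2 _ _ _ _ h
    refine ⟨hR, ?_⟩
    intro l v r v' h
    induction l generalizing v with
    | nil =>
      rw [goA_nil] at h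
      injection h with h'
      injection h' with h1 h2
      exact Or.inr h1.symm
    | cons x xs ihl =>
      by_cases hv : vget v x = true
      · rw [goA_cons, if_pos hv] at h; exact ihl v h
      · rcases hrec : recA node num (f + 1) x (vset v x) with _ | ⟨r0, v2⟩
        · rw [goA_cons, if_neg hv] at h
          simp only [hrec] at h
          simp at h
        · rw [goA_cons, if_neg hv] at h
          simp only [hrec] at h
          by_cases h0 : r0 = 0
          · rw [if_neg (fun hc => hc h0)] at h
            exact ihl v2 h
          · rw [if_pos h0] at h
            injection h with h'
            injection h' with h1 h2
            rw [← h1]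
            exact hR _ _ _ _ hrec

lemma zero_B (node : List (Int × List Int)) (num : Int) : ∀ f stack v r,
    stepB node num f stack v = some r → r = num ∨ r = 0 := by
  intro f
  induction f with
  | zero => intro stack v r h; rw [stepB_zero] at h; cases h
  | succ f ih =>
    intro stack v r h
    match stack with
    | [] =>
      rw [stepB_nil] at h
      injection h with h'
      exact Or.inr h'.symm
    | [] :: rest =>
      rw [stepB_pop] at h
      exact ih _ _ _ h
    | (x :: xs) :: rest =>
      rw [stepB_cons] at h
      by_cases hv : vget v x = true
      · rw [if_pos hv] at h; exact ih _ _ _ h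
      · rw [if_neg hv] at h
        by_cases hx : x = 1
        · rw [if_pos hx] at h
          injection h with h'
          exact Or.inl h'.symm
        · rw [if_neg hx] at h; exact ih _ _ _ h

-- ---- the simulation: A's loop result is reproduced by B's stack machine ----
lemma sim (node : List (Int × List Int)) (num : Int) (hnum : num ≠ 0) : ∀ f : Nat,
    ∀ l v r v' rest result, goA node num f l v = some (r, v') →
      ((r ≠ 0 ∧ result = r) ∨ (r = 0 ∧ ∃ g, stepB node num g rest v' = some result)) →
      ∃ h, stepB node num h (l :: rest) v = some result := by
  intro f
  induction f with
  | zero =>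
    intro l v r v' rest result h hres
    induction l generalizing v with
    | nil =>
      rw [goA_nil] at h
      injection h with h'
      injection h' with h1 h2
      rcases hres with ⟨hr, _⟩ | ⟨_, g, hg⟩
      · exact absurd h1.symm hr
      · rw [← h2] at hg
        exact ⟨g + 1, by rw [stepB_pop]; exact hg⟩
    | cons x xs ihl =>
      by_cases hv : vget v x = true
      · rw [goA_cons, if_pos hv] at h
        obtain ⟨h0, hst⟩ := ihl v h
        exact ⟨h0 + 1, by rw [stepB_cons, if_pos hv]; exact hst⟩
      · rw [goA_cons, if_neg hv] at h
        simp only [recA_zero] at h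
        simp at h
  | succ f ih =>
    intro l v r v' rest result h hres
    induction l generalizing v with
    | nil =>
      rw [goA_nil] at h
      injection h with h'
      injection h' with h1 h2
      rcases hres with ⟨hr, _⟩ | ⟨_, g, hg⟩
      · exact absurd h1.symm hr
      · rw [← h2] at hg
        exact ⟨g + 1, by rw [stepB_pop]; exact hg⟩
    | cons x xs ihl =>
      by_cases hv : vget v x = true
      · rw [goA_cons, if_pos hv] at h
        obtain ⟨h0, hst⟩ := ihl v h
        exact ⟨h0 + 1, by rw [stepB_cons, if_pos hv]; exact hst⟩
      · rcases hrec : recA node num (f + 1) x (vset v x) with _ | ⟨r0, v2⟩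
        · rw [goA_cons, if_neg hv] at h
          simp only [hrec] at h
          simp at h
        · rw [goA_cons, if_neg hv] at h
          simp only [hrec] at h
          by_cases hx : x = 1
          · -- reaching node 1: recA returns (num, vset v x)
            subst hx
            rw [recA_succ, if_pos rfl] at hrec
            injection hrec with hrec'
            injection hrec' with hr0 hv2
            rw [← hr0, if_pos hnum] at h
            injection h with h'
            injection h' with h1 _
            rcases hres with ⟨_, hresult⟩ | ⟨hr, _⟩
            · rw [hresult, ← h1]
              refine ⟨1, ?_⟩
              show stepB node num (0 + 1) ((1 :: xs) :: rest) v = some num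
              rw [stepB_cons, if_neg hv, if_pos rfl]
            · rw [← h1] at hr; exact absurd hr hnum
          · -- descend: recA (f+1) x = goA f (adjOf node x)
            have hgo : goA node num f (adjOf node x) (vset v x) = some (r0, v2) := by
              rw [recA_succ, if_neg hx] at hrec; exact hrec
            by_cases hr0 : r0 = 0
            · -- inner call found nothing: continue with xs at v2
              rw [if_neg (fun hc => hc hr0)] at h
              obtain ⟨h1, hst1⟩ := ihl v2 h
              obtain ⟨h2, hst2⟩ := ih (adjOf node x) (vset v x) r0 v2 (xs :: rest) result hgo
                (Or.inr ⟨hr0, h1, hst1⟩)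
              exact ⟨h2 + 1, by rw [stepB_cons, if_neg hv, if_neg hx]; exact hst2⟩
            · -- inner call found a result r0 ≠ 0: it is propagated
              rw [if_pos hr0] at h
              injection h with h'
              injection h' with h1 _
              rcases hres with ⟨_, hresult⟩ | ⟨hr, _⟩
              · obtain ⟨h2, hst2⟩ := ih (adjOf node x) (vset v x) r0 v2 (xs :: rest) result hgo
                  (Or.inl ⟨hr0, by rw [hresult, ← h1]⟩)
                exact ⟨h2 + 1, by rw [stepB_cons, if_neg hv, if_neg hx]; exact hst2⟩
              · rw [← h1] at hr; exact absurd hr hr0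

-- ===== VERDICT (by name: the statement is the Claim_ definition above) =====
theorem dfs_spec : Claim_equal_dfs := by
  intro n node position visited num _ hpre
  unfold Spec_dfs
  by_cases hnum : num = 0
  · -- with num = 0 every result of either machine is 0
    subst hnum
    have hL : dfs n node position visited 0 = 0 := by
      unfold dfs
      rcases hA : recA node 0 ((allAdj node).length + 1) position visited with _ | ⟨r, v'⟩
      · simp only [hA]
      · simp only [hA]
        rcases (zero_AB node 0 _).1 _ _ _ _ hA with h | h <;> exact h
    have hRv : dfs_alt n node position visited 0 = 0 := by
      unfold dfs_alt
      by_cases hp : position = 1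
      · rw [if_pos hp]
      · rw [if_neg hp]
        rcases hB : stepB node 0 (fuelB node) [adjOf node position] visited with _ | s
        · simp only [hB]
        · simp only [hB]
          rcases zero_B node 0 _ _ _ _ hB with h | h <;> exact h
    rw [hL, hRv]
  · by_cases hp : position = 1
    · -- both return num immediately
      have hA : recA node num ((allAdj node).length + 1) position visited = some (num, visited) := by
        rw [recA_succ, if_pos hp]
      unfold dfs dfs_alt
      simp only [hA, if_pos hp]
    · -- A runs its loop; the stack machine reproduces its result
      obtain ⟨⟨r, v'⟩, hA⟩ := (suff_AB node num ((allAdj node).length + 1)).1 position visited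
        (by have := mcount_le (allAdj node) visited; omega)
      have hgo : goA node num ((allAdj node).length) (adjOf node position) visited = some (r, v') := by
        rw [recA_succ, if_neg hp] at hA; exact hA
      have hsim : ∃ h, stepB node num h [adjOf node position] visited = some r := by
        apply sim node num hnum _ _ _ _ _ _ _ hgo
        by_cases hr : r = 0
        · refine Or.inr ⟨hr, 1, ?_⟩
          rw [hr]
          exact stepB_nil ..
        · exact Or.inl ⟨hr, rfl⟩
      obtain ⟨h, hst⟩ := hsim
      obtain ⟨s, hB⟩ := stepB_suff node num (fuelB node) [adjOf node position] visited
        (by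
          intro l hl
          rcases List.mem_cons.mp hl with h' | h'
          · subst h'; exact (adjOf_subset node position).1
          · cases h')
        (by
          have h1 := mcount_le (allAdj node) visited
          have h2 := (adjOf_subset node position).2
          simp only [phi, fuelB, List.map_cons, List.map_nil, List.sum_cons, List.sum_nil]
          nlinarith)
      have heq : r = s := by
        have h1 := stepB_mono_le node num h (max h (fuelB node)) (le_max_left _ _) _ _ _ hst
        have h2 := stepB_mono_le node num (fuelB node) (max h (fuelB node)) (le_max_right _ _) _ _ _ hB
        rw [h1] at h2; exact Option.some.inj h2
      unfold dfs dfs_alt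
      simp only [hA, hB, if_neg hp]
      exact heq
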